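-- pv_equiv track=rewrite | github.com/mdsmith/PyTreeTools | parsers.py | phylnames
-- ===== SOURCE A (Python) =====
-- def phylnames(seqs):
--   import string
--   import math
--   sorted_keys = sorted(seqs.keys())
--   p_chain = {}
--   for key in sorted_keys:
--     if key[1:9] not in p_chain:
--       p_chain[key[1:9]] = []
--     p_chain[key[1:9]].append(key)
--
--   p_seqs = {}
--   alpha = list(string.ascii_lowercase) + list(string.ascii_uppercase)
--   for name, key_list in p_chain.items():
--     if len(key_list) > 52:
--       for i,key in enumerate(key_list):
--         p_seqs[name[:-1] + alpha[math.floor(i/52)] + alpha[i%52]] = seqs[key]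
--     else:
--       for i,key in enumerate(key_list):
--         p_seqs[name + alpha[i]] = seqs[key]
--   return p_seqs
-- ===== SOURCE B (Python) =====
-- def phylnames(seqs):
--   import string
--   alpha = string.ascii_lowercase + string.ascii_uppercase
--   keys = sorted(seqs)
--   # one pre-pass: size of each key[1:9] group, and the order groups first appear
--   counts, rank = {}, {}
--   for k in keys:
--     g = k[1:9]
--     counts[g] = counts.get(g, 0) + 1
--     rank.setdefault(g, len(rank))
--   # one flat pass: name each key from its group's size and a running index
--   entries = []
--   index = {}
--   for k in keys:
--     g = k[1:9]
--     i = index.get(g, 0)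
--     index[g] = i + 1
--     if counts[g] > 52:
--       name = g[:-1] + alpha[i // 52] + alpha[i % 52]
--     else:
--       name = g + alpha[i]
--     entries.append((rank[g], name, seqs[k]))
--   # stable sort by group rank blocks the output by group
--   entries.sort(key=lambda e: e[0])
--   return {name: seq for _, name, seq in entries}
-- ===== Notes on version B (the rewrite author's own statement) =====
-- stated objective: alternative
-- what changed: B never builds A's dict of per-group key lists with nested group loops: it makes one counting pre-pass over the sorted keys (group sizes and first-appearance ranks), then one flat pass naming every key from its group's size and a running per-group index, and finally a stable sort of the (rank, name, value) entries by rank to block the output by group. Pre_ excludes only inputs on which A (and B) raise IndexError: a key[1:9] group with more than 52*52 keys.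
import Mathlib
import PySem

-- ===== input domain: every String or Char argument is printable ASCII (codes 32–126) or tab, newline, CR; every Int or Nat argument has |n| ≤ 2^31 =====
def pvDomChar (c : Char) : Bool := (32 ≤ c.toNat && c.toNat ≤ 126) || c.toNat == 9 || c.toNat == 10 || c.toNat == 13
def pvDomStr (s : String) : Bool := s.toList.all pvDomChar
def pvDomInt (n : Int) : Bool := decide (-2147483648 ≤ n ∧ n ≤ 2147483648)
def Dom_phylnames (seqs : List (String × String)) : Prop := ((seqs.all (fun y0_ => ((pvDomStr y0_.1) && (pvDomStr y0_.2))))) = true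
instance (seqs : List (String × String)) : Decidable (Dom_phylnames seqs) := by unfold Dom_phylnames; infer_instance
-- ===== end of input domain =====

-- B replaces A's dict of per-group key lists and nested group loops by a counting pre-pass over the
-- sorted keys, one flat renaming pass with a running per-group index, and a stable sort of the
-- (group-rank, name, value) entries that blocks the output by group (objective: alternative).

-- key[1:9] (both Pythons compute this substring)
def pvSub (k : String) : String := PySem.Str.slice k (some 1) (some 9)

-- ===== PORT A =====
-- alpha = list(string.ascii_lowercase) + list(string.ascii_uppercase)
def pvAlphaA : List Char :=
  "abcdefghijklmnopqrstuvwxyz".toList ++ "ABCDEFGHIJKLMNOPQRSTUVWXYZ".toList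

def phylnames (seqs : List (String × String)) : List (String × String) :=
  let seqsD := PySem.Dict.ofList seqs
  let sorted_keys := PySem.List.sorted seqsD.keys (fun k => k) false
  let p_chain : PySem.Dict String (List String) :=
    sorted_keys.foldl (fun d key =>
      -- if key[1:9] not in p_chain: p_chain[key[1:9]] = []
      let d := if d.contains (pvSub key) then d else d.insert (pvSub key) ([] : List String)
      -- p_chain[key[1:9]].append(key)  (in-place append = overwrite with the extended list)
      d.insert (pvSub key) (d.getD (pvSub key) [] ++ [key])) PySem.Dict.empty
  let p_seqs : PySem.Dict String String :=
    p_chain.items.foldl (fun p nk =>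
      if nk.2.length > 52 then
        (PySem.List.enumerate nk.2 0).foldl (fun p ik =>
          -- alpha indexing: '.getD '?'' is unreachable under Pre_ (Python raises IndexError there)
          p.insert (PySem.Str.slice nk.1 none (some (-1))
              ++ String.ofList [(PySem.List.pyGet? pvAlphaA (PySem.Int.floordiv ik.1 52)).getD '?',
                            (PySem.List.pyGet? pvAlphaA (PySem.Int.mod ik.1 52)).getD '?'])
            (seqsD.getD ik.2 "")) p
      else
        (PySem.List.enumerate nk.2 0).foldl (fun p ik =>
          p.insert (nk.1 ++ String.ofList [(PySem.List.pyGet? pvAlphaA ik.1).getD '?'])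
            (seqsD.getD ik.2 "")) p) PySem.Dict.empty
  p_seqs.items

-- ===== PORT B =====
-- alpha = string.ascii_lowercase + string.ascii_uppercase
def pvAlphaB : String := "abcdefghijklmnopqrstuvwxyzABCDEFGHIJKLMNOPQRSTUVWXYZ"

def phylnames_alt (seqs : List (String × String)) : List (String × String) :=
  let seqsD := PySem.Dict.ofList seqs
  let keys := PySem.List.sorted seqsD.keys (fun k => k) false
  -- counts, rank = {}, {} ; counts[g] = counts.get(g, 0) + 1 ; rank.setdefault(g, len(rank))
  let cr : PySem.Dict String Int × PySem.Dict String Int :=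
    keys.foldl (fun cr k =>
      (cr.1.insert (pvSub k) (cr.1.getD (pvSub k) 0 + 1),
       if cr.2.contains (pvSub k) then cr.2
       else cr.2.insert (pvSub k) (PySem.List.len cr.2.items)))
      (PySem.Dict.empty, PySem.Dict.empty)
  -- entries = [] ; index = {} ; one flat pass over keys
  let st : List (Int × String × String) × PySem.Dict String Int :=
    keys.foldl (fun st k =>
      let g := pvSub k
      let i := st.2.getD g 0
      let nm := if cr.1.getD g 0 > 52 then
          PySem.Str.slice g none (some (-1))
            ++ String.ofList [(PySem.Str.pyGet? pvAlphaB (PySem.Int.floordiv i 52)).getD '?',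
                          (PySem.Str.pyGet? pvAlphaB (PySem.Int.mod i 52)).getD '?']
        else
          g ++ String.ofList [(PySem.Str.pyGet? pvAlphaB i).getD '?']
      (st.1 ++ [(cr.2.getD g 0, nm, seqsD.getD k "")], st.2.insert g (i + 1)))
      ([], PySem.Dict.empty)
  -- entries.sort(key=lambda e: e[0])  (stable)
  let es := PySem.List.sorted st.1 (fun e => e.1) false
  -- {name: seq for _, name, seq in entries}
  (es.foldl (fun d e => d.insert e.2.1 e.2.2) (PySem.Dict.empty : PySem.Dict String String)).items

-- ===== PRECONDITION & SPEC =====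
-- Pre_ excludes only inputs on which Python A raises IndexError: some key[1:9] group of the
-- dict holding more than 52*52 = 2704 keys (alpha[i//52] is then out of range). Python B raises there too.
def Pre_phylnames (seqs : List (String × String)) : Prop :=
  ∀ k ∈ (PySem.Dict.ofList seqs).keys,
    (((PySem.Dict.ofList seqs).keys.filter (fun k' => pvSub k' == pvSub k)).length ≤ 2704)
instance (seqs : List (String × String)) : Decidable (Pre_phylnames seqs) := by
  unfold Pre_phylnames; infer_instance

def pvWitness_phylnames : (List (String × String)) :=
  [("seq_alpha_1", "ACGT"), ("seq_alpha_2", "GGTA"), ("other", "T")]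

def Spec_phylnames (seqs : List (String × String)) (out : List (String × String)) : Prop := out = phylnames_alt seqs
instance (seqs : List (String × String)) (out : List (String × String)) : Decidable (Spec_phylnames seqs out) := by unfold Spec_phylnames; infer_instance

-- ===== CLAIM (what is proved, stated in full; the proofs are below) =====
def Claim_equal_phylnames : Prop := ∀ (seqs : List (String × String)), Dom_phylnames seqs → Pre_phylnames seqs → Spec_phylnames seqs (phylnames seqs)

-- ===== LEMMAS AND PROOFS =====

-- the group-major canonical form both ports are reduced to
def pvSeg (keys : List String) (g : String) : List String := keys.filter (fun k => pvSub k == g)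

def pvName (g : String) (n : Nat) (i : Int) : String :=
  if 52 < n then
    PySem.Str.slice g none (some (-1))
      ++ String.ofList [(PySem.List.pyGet? pvAlphaA (PySem.Int.floordiv i 52)).getD '?',
                    (PySem.List.pyGet? pvAlphaA (PySem.Int.mod i 52)).getD '?']
  else
    g ++ String.ofList [(PySem.List.pyGet? pvAlphaA i).getD '?']

def pvEmit (sD : PySem.Dict String String) (g : String) (ks : List String) (j : Int) : List (String × String) :=
  (PySem.List.enumerate ks j).map (fun ik => (pvName g ks.length ik.1, sD.getD ik.2 ""))

def pvCanon (seqs : List (String × String)) : PySem.Dict String String :=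
  let sD := PySem.Dict.ofList seqs
  let keys := PySem.List.sorted sD.keys (fun k => k) false
  (PySem.List.dedup (keys.map pvSub)).foldl
    (fun p g => (pvEmit sD g (pvSeg keys g) 0).foldl (fun p e => p.insert e.1 e.2) p)
    PySem.Dict.empty

lemma pvAlphaB_get (i : Int) : PySem.Str.pyGet? pvAlphaB i = PySem.List.pyGet? pvAlphaA i := by
  have h : pvAlphaB.toList = pvAlphaA := by decide
  simp [PySem.Str.pyGet?, h]

lemma pvGetD_items_map {ν : Type} (d : PySem.Dict String ν) (G : List String) (F : String → ν)
    (h : d.items = G.map (fun g => (g, F g))) (g : String) (d0 : ν) :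
    d.getD g d0 = if g ∈ G then F g else d0 := by
  simp only [PySem.Dict.getD, PySem.Dict.get?, h]
  clear h
  induction G with
  | nil => simp
  | cons a t ih =>
    by_cases hg : g = a
    · subst hg; simp
    · simpa [List.find?, Ne.symm hg, hg] using ih

lemma pvStepA_eq (d : PySem.Dict String (List String)) (k : String) :
    (let d' := if d.contains (pvSub k) then d else d.insert (pvSub k) ([] : List String)
     d'.insert (pvSub k) (d'.getD (pvSub k) [] ++ [k]))
    = d.insert (pvSub k) (d.getD (pvSub k) [] ++ [k]) := by
  by_cases h : d.contains (pvSub k)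
  · simp [h]
  · simp only [eq_false_of_ne_true h, Bool.false_eq_true, if_false]
    rw [PySem.Dict.getD_insert_self, PySem.Dict.insert_insert_self]
    have : d.getD (pvSub k) [] = [] := by
      simp [PySem.Dict.getD, (PySem.Dict.get?_eq_none_iff_contains d (pvSub k)).2 (by simp [h])]
    rw [this]

lemma pvGroupFold {ν : Type} (comb : ν → String → ν) (d0 : ν) (l : List String) :
    (l.foldl (fun d k => PySem.Dict.insert d (pvSub k) (comb (PySem.Dict.getD d (pvSub k) d0) k)) PySem.Dict.empty).items
    = (PySem.List.dedup (l.map pvSub)).map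
        (fun g => (g, (l.filter (fun k => pvSub k == g)).foldl comb d0)) := by
  induction l using List.reverseRecOn with
  | nil => simp [PySem.Dict.empty, PySem.List.dedup, PySem.Set.ofList]
  | append_singleton l k ih =>
    rw [List.foldl_append]
    simp only [List.foldl_cons, List.foldl_nil]
    set d := l.foldl (fun d k => PySem.Dict.insert d (pvSub k) (comb (PySem.Dict.getD d (pvSub k) d0) k)) PySem.Dict.empty with hd
    set G := PySem.List.dedup (l.map pvSub) with hG
    set F : String → ν := fun g => (l.filter (fun k => pvSub k == g)).foldl comb d0 with hF
    have hitems : d.items = G.map (fun g => (g, F g)) := ih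
    have hkeys : d.keys = G := by
      simp [PySem.Dict.keys, hitems, List.map_map, Function.comp_def]
    have hdedup : PySem.List.dedup ((l ++ [k]).map pvSub) = PySem.Set.add G (pvSub k) := by
      simp only [PySem.List.dedup_eq_ofList, PySem.Set.ofList_eq_foldl, List.map_append,
        List.foldl_append, List.map_cons, List.map_nil, List.foldl_cons, List.foldl_nil]
      rw [hG, PySem.List.dedup_eq_ofList, PySem.Set.ofList_eq_foldl]
    have hfilter : ∀ g : String, (l ++ [k]).filter (fun k' => pvSub k' == g)
        = l.filter (fun k' => pvSub k' == g) ++ (if (pvSub k == g) = true then [k] else []) := by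
      intro g; rw [List.filter_append]; cases h : pvSub k == g <;> simp [h]
    by_cases hs : pvSub k ∈ G
    · have hcont : d.contains (pvSub k) = true := by
        rw [PySem.Dict.contains_iff_mem_keys, hkeys]; exact hs
      rw [PySem.Dict.items_insert_of_contains d _ hcont]
      have hget : d.getD (pvSub k) d0 = F (pvSub k) := by
        rw [pvGetD_items_map d G F hitems, if_pos hs]
      rw [hget, hitems, hdedup, List.map_map]
      have hadd : PySem.Set.add G (pvSub k) = G := by
        simp [PySem.Set.add, PySem.Set.contains, hs]
      rw [hadd]
      apply List.map_congr_left
      intro g hg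
      simp only [Function.comp_apply]
      by_cases hgs : g = pvSub k
      · subst hgs
        simp only [beq_self_eq_true, if_true, hfilter, beq_self_eq_true]
        simp [List.foldl_append, hF]
      · have : (g == pvSub k) = false := by simp [hgs]
        simp only [this, Bool.false_eq_true, if_false, hfilter]
        have : (pvSub k == g) = false := by
          simp only [beq_eq_false_iff_ne, ne_eq]; exact fun h => hgs h.symm
        simp [this, hF]
    · have hcont : d.contains (pvSub k) = false := by
        rw [Bool.eq_false_iff]; intro hc
        exact hs (hkeys ▸ (PySem.Dict.contains_iff_mem_keys d (pvSub k)).1 hc)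
      rw [PySem.Dict.items_insert_of_not_contains d _ hcont]
      have hget : d.getD (pvSub k) d0 = d0 := by
        rw [pvGetD_items_map d G F hitems, if_neg hs]
      have hadd : PySem.Set.add G (pvSub k) = G ++ [pvSub k] := by
        simp [PySem.Set.add, PySem.Set.contains, hs]
      have hnil : l.filter (fun k' => pvSub k' == pvSub k) = [] := by
        rw [List.filter_eq_nil_iff]
        intro a ha hba
        exact hs (by
          rw [hG, PySem.List.dedup_eq_ofList]
          have : pvSub k ∈ l.map pvSub := by
            exact (eq_of_beq hba) ▸ List.mem_map_of_mem ha
          simpa [PySem.Set.mem_ofList] using this)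
      rw [hget, hitems, hdedup, hadd, List.map_append]
      congr 1
      · apply List.map_congr_left
        intro g hg
        have : (pvSub k == g) = false := by
          simp only [beq_eq_false_iff_ne, ne_eq]
          intro h; exact hs (h ▸ hg)
        simp [hfilter, this, hF]
      · simp [hfilter, hnil]

lemma pvA_eq (seqs : List (String × String)) : phylnames seqs = (pvCanon seqs).items := by
  unfold phylnames pvCanon
  simp only []
  set sD := PySem.Dict.ofList seqs with hsD
  set keys := PySem.List.sorted sD.keys (fun k => k) false with hkeys
  -- normalise A's grouping step
  rw [PySem.List.foldl_congr_mem keys _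
    (fun d k => PySem.Dict.insert d (pvSub k) ((fun (acc : List String) k => acc ++ [k]) (PySem.Dict.getD d (pvSub k) []) k))
    PySem.Dict.empty (fun acc x _ => pvStepA_eq acc x)]
  rw [pvGroupFold (fun (acc : List String) k => acc ++ [k]) [] keys]
  congr 1
  rw [List.foldl_map]
  apply PySem.List.foldl_congr_mem
  intro p g hg
  simp only [PySem.List.foldl_append_singleton_eq_self, List.nil_append]
  show _ = (pvEmit sD g (pvSeg keys g) 0).foldl (fun p e => p.insert e.1 e.2) p
  rw [pvEmit, List.foldl_map]
  by_cases hn : 52 < (pvSeg keys g).length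
  · rw [if_pos (by simpa [pvSeg] using hn)]
    apply PySem.List.foldl_congr_mem
    intro acc ik _
    simp only [pvSeg] at *
    rw [pvName, if_pos hn]
  · rw [if_neg (by simpa [pvSeg] using hn)]
    apply PySem.List.foldl_congr_mem
    intro acc ik _
    rw [pvName, if_neg hn]

-- ===== B-side lemmas =====

-- enumerate over an appended element
lemma pvEnum_append {α : Type} (xs : List α) (y : α) (j : Int) :
    PySem.List.enumerate (xs ++ [y]) j = PySem.List.enumerate xs j ++ [(j + xs.length, y)] := by
  induction xs generalizing j with
  | nil => simp [PySem.List.enumerate]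
  | cons x t ih =>
    simp only [List.cons_append, PySem.List.enumerate, ih (j + 1), List.length_cons]
    push_cast
    have h2 : j + 1 + (t.length : Int) = j + ((t.length : Int) + 1) := by omega
    rw [h2]

-- the rank dict: items are the groups in first-appearance order, paired with 0,1,2,…
lemma pvRankFold (l : List String) :
    (l.foldl (fun r k => if PySem.Dict.contains r (pvSub k) then r
        else r.insert (pvSub k) (PySem.List.len r.items))
      (PySem.Dict.empty : PySem.Dict String Int)).items
    = (PySem.List.dedup (l.map pvSub)).zipIdx.map (fun p => (p.1, (p.2 : Int))) := by
  induction l using List.reverseRecOn with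
  | nil => simp [PySem.Dict.empty, PySem.List.dedup, PySem.Set.ofList]
  | append_singleton l k ih =>
    rw [List.foldl_append]
    simp only [List.foldl_cons, List.foldl_nil]
    set d := l.foldl (fun r k => if PySem.Dict.contains r (pvSub k) then r
        else r.insert (pvSub k) (PySem.List.len r.items))
      (PySem.Dict.empty : PySem.Dict String Int) with hd
    set G := PySem.List.dedup (l.map pvSub) with hG
    have hkeys : d.keys = G := by
      simp [PySem.Dict.keys, ih, List.map_map, Function.comp_def]
    have hdedup : PySem.List.dedup ((l ++ [k]).map pvSub) = PySem.Set.add G (pvSub k) := by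
      simp only [PySem.List.dedup_eq_ofList, PySem.Set.ofList_eq_foldl, List.map_append,
        List.foldl_append, List.map_cons, List.map_nil, List.foldl_cons, List.foldl_nil]
      rw [hG, PySem.List.dedup_eq_ofList, PySem.Set.ofList_eq_foldl]
    by_cases hs : pvSub k ∈ G
    · have hcont : d.contains (pvSub k) = true := by
        rw [PySem.Dict.contains_iff_mem_keys, hkeys]; exact hs
      rw [if_pos hcont, hdedup]
      have hadd : PySem.Set.add G (pvSub k) = G := by
        simp [PySem.Set.add, PySem.Set.contains, hs]
      rw [hadd, ih]
    · have hcont : d.contains (pvSub k) = false := by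
        rw [Bool.eq_false_iff]; intro hc
        exact hs (hkeys ▸ (PySem.Dict.contains_iff_mem_keys d (pvSub k)).1 hc)
      rw [if_neg (by simp [hcont]),
        PySem.Dict.items_insert_of_not_contains d _ hcont, hdedup]
      have hadd : PySem.Set.add G (pvSub k) = G ++ [pvSub k] := by
        simp [PySem.Set.add, PySem.Set.contains, hs]
      have hlen : G.length = d.items.length := by
        have := congrArg List.length ih
        simpa using this.symm
      rw [hadd, List.zipIdx_append, List.map_append, ih]
      simp [PySem.List.len_eq, List.zipIdx, hlen]

-- lookup in a dict whose items are (group, index) pairs: getD of a member is its idxOf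
lemma pvFind_zipIdx (G : List String) (hnd : G.Nodup) (g : String) (hg : g ∈ G) (n : Nat) :
    ((G.zipIdx n).map (fun p => (p.1, (p.2 : Int)))).find? (fun e => e.1 == g)
      = some (g, ((n + G.idxOf g : Nat) : Int)) := by
  induction G generalizing n with
  | nil => cases hg
  | cons a t ih =>
    by_cases hga : g = a
    · subst hga
      simp [List.zipIdx]
    · have hgt : g ∈ t := by
        rcases List.mem_cons.1 hg with h | h
        · exact absurd h hga
        · exact h
      have hne : (a == g) = false := by
        simp only [beq_eq_false_iff_ne, ne_eq]; exact fun h => hga h.symm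
      simp only [List.zipIdx, List.map_cons, List.find?, hne]
      rw [ih (List.Nodup.of_cons hnd) hgt (n + 1)]
      have : List.idxOf g (a :: t) = List.idxOf g t + 1 := by
        simp [List.idxOf_cons, hne]
      rw [this]
      congr 2
      omega

lemma pvRankGet (d : PySem.Dict String Int) (G : List String) (hnd : G.Nodup)
    (h : d.items = G.zipIdx.map (fun p => (p.1, (p.2 : Int)))) (g : String) (hg : g ∈ G) :
    d.getD g 0 = (G.idxOf g : Int) := by
  simp only [PySem.Dict.getD, PySem.Dict.get?, h]
  rw [pvFind_zipIdx G hnd g hg 0]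
  simp

-- insertBy into P ++ Q lands between P (all not-before) and Q (all before)
lemma pvInsertBy_split {α : Type} (before : α → α → Bool) (x : α) (P Q : List α)
    (hP : ∀ p ∈ P, before x p = false) (hQ : ∀ q ∈ Q, before x q = true) :
    PySem.List.insertBy before x (P ++ Q) = P ++ x :: Q := by
  induction P with
  | nil =>
    cases Q with
    | nil => simp [PySem.List.insertBy]
    | cons q t => simp [PySem.List.insertBy, hQ q (List.mem_cons_self)]
  | cons p t ih =>
    simp only [List.cons_append, PySem.List.insertBy, hP p (List.mem_cons_self),
      Bool.false_eq_true, if_false]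
    rw [ih (fun p' hp' => hP p' (List.mem_cons_of_mem _ hp'))]

-- a stable sort whose keys all lie in a strictly increasing list R is the concatenation of the
-- key-classes in R-order, each in original order
lemma pvStableSort {α : Type} (key : α → Int) (l : List α) (R : List Int)
    (hR : R.Pairwise (· < ·)) (hcov : ∀ e ∈ l, key e ∈ R) :
    PySem.List.sorted l key false = R.flatMap (fun r => l.filter (fun e => key e == r)) := by
  rw [PySem.List.sorted_eq_foldl_insertBy]
  induction l using List.reverseRecOn with
  | nil => simp
  | append_singleton l x ih =>
    rw [List.foldl_append]
    simp only [List.foldl_cons, List.foldl_nil]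
    rw [ih (fun e he => hcov e (List.mem_append_left _ he))]
    obtain ⟨R1, R2, hsplit⟩ := List.append_of_mem (hcov x (by simp))
    subst hsplit
    have hpw := List.pairwise_append.1 hR
    have h1 : ∀ r ∈ R1, r < key x := fun r hr => (hpw.2.2 r hr (key x) (by simp))
    have h2 : ∀ r ∈ R2, key x < r := by
      have := List.pairwise_cons.1 hpw.2.1
      exact fun r hr => this.1 r hr
    have hfilter : ∀ r : Int, (l ++ [x]).filter (fun e => key e == r)
        = l.filter (fun e => key e == r) ++ (if (key x == r) = true then [x] else []) := by
      intro r; rw [List.filter_append]; cases h : key x == r <;> simp [h]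
    have hkeyOf : ∀ (r : Int) (e : α), e ∈ l.filter (fun e => key e == r) → key e = r := by
      intro r e he
      exact eq_of_beq (List.mem_filter.1 he).2
    have hL : (R1 ++ key x :: R2).flatMap (fun r => l.filter (fun e => key e == r))
        = (R1.flatMap (fun r => l.filter (fun e => key e == r)) ++ l.filter (fun e => key e == key x))
          ++ R2.flatMap (fun r => l.filter (fun e => key e == r)) := by
      simp [List.flatMap_append, List.flatMap_cons, List.append_assoc]
    rw [hL, pvInsertBy_split _ x _ _
      (by
        intro p hp
        rcases List.mem_append.1 hp with hp | hp
        · obtain ⟨r, hr, hpe⟩ := List.mem_flatMap.1 hp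
          rw [hkeyOf r p hpe]
          simp only [decide_eq_false_iff_not, not_lt]
          exact le_of_lt (h1 r hr)
        · rw [hkeyOf (key x) p hp]
          simp)
      (by
        intro q hq
        obtain ⟨r, hr, hqe⟩ := List.mem_flatMap.1 hq
        rw [hkeyOf r q hqe]
        simp only [decide_eq_true_eq]
        exact h2 r hr)]
    have hR1 : R1.flatMap (fun r => (l ++ [x]).filter (fun e => key e == r))
        = R1.flatMap (fun r => l.filter (fun e => key e == r)) := by
      apply List.flatMap_congr
      intro r hr
      rw [hfilter r, if_neg (by simp only [beq_iff_eq]; exact ne_of_gt (h1 r hr)), List.append_nil]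
    have hR2 : R2.flatMap (fun r => (l ++ [x]).filter (fun e => key e == r))
        = R2.flatMap (fun r => l.filter (fun e => key e == r)) := by
      apply List.flatMap_congr
      intro r hr
      rw [hfilter r, if_neg (by simp only [beq_iff_eq]; exact ne_of_lt (h2 r hr)), List.append_nil]
    rw [List.flatMap_append, List.flatMap_cons, hR1, hR2, hfilter (key x), if_pos (by simp)]
    simp [List.append_assoc]

-- the step of B's flat renaming pass (proof-side name for the port's loop body)
def pvMainStep (sD : PySem.Dict String String) (C rkD : PySem.Dict String Int)
    (st : List (Int × String × String) × PySem.Dict String Int) (k : String) :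
    List (Int × String × String) × PySem.Dict String Int :=
  let g := pvSub k
  let i := st.2.getD g 0
  let nm := if C.getD g 0 > 52 then
      PySem.Str.slice g none (some (-1))
        ++ String.ofList [(PySem.Str.pyGet? pvAlphaB (PySem.Int.floordiv i 52)).getD '?',
                      (PySem.Str.pyGet? pvAlphaB (PySem.Int.mod i 52)).getD '?']
    else
      g ++ String.ofList [(PySem.Str.pyGet? pvAlphaB i).getD '?']
  (st.1 ++ [(rkD.getD g 0, nm, sD.getD k "")], st.2.insert g (i + 1))

lemma pvMainFold (sD : PySem.Dict String String) (C rkD : PySem.Dict String Int)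
    (G : List String) (N : String → Nat)
    (hC : ∀ g ∈ G, C.getD g 0 = (N g : Int))
    (hR : ∀ g ∈ G, rkD.getD g 0 = (G.idxOf g : Int))
    (l : List String) (hl : ∀ k ∈ l, pvSub k ∈ G) :
    (∀ g : String,
      (l.foldl (pvMainStep sD C rkD) ([], PySem.Dict.empty)).2.getD g 0 = ((pvSeg l g).length : Int))
    ∧ (∀ g ∈ G, (l.foldl (pvMainStep sD C rkD) ([], PySem.Dict.empty)).1.filter
          (fun e => e.1 == (G.idxOf g : Int))
        = (PySem.List.enumerate (pvSeg l g) 0).map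
            (fun ik => ((G.idxOf g : Int), pvName g (N g) ik.1, sD.getD ik.2 "")))
    ∧ (∀ e ∈ (l.foldl (pvMainStep sD C rkD) ([], PySem.Dict.empty)).1,
        ∃ g ∈ G, e.1 = (G.idxOf g : Int)) := by
  induction l using List.reverseRecOn with
  | nil =>
    refine ⟨fun g => by simp [pvSeg, PySem.Dict.getD_empty], fun g _ => by simp [pvSeg], fun e he => absurd he (by simp)⟩
  | append_singleton l k ih =>
    obtain ⟨ha, hb, hc⟩ := ih (fun k' hk' => hl k' (List.mem_append_left _ hk'))
    have hg0 : pvSub k ∈ G := hl k (by simp)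
    set st := l.foldl (pvMainStep sD C rkD) ([], PySem.Dict.empty) with hst
    set g0 := pvSub k with hg0def
    have hseg : ∀ g : String, pvSeg (l ++ [k]) g = pvSeg l g ++ (if (g0 == g) = true then [k] else []) := by
      intro g
      rw [pvSeg, List.filter_append]
      cases h : g0 == g <;> simp [pvSeg, hg0def ▸ h]
    have hi : st.2.getD g0 0 = ((pvSeg l g0).length : Int) := ha g0
    have hname : (if C.getD g0 0 > 52 then
          PySem.Str.slice g0 none (some (-1))
            ++ String.ofList [(PySem.Str.pyGet? pvAlphaB (PySem.Int.floordiv (st.2.getD g0 0) 52)).getD '?',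
                          (PySem.Str.pyGet? pvAlphaB (PySem.Int.mod (st.2.getD g0 0) 52)).getD '?']
        else
          g0 ++ String.ofList [(PySem.Str.pyGet? pvAlphaB (st.2.getD g0 0)).getD '?'])
        = pvName g0 (N g0) ((pvSeg l g0).length : Int) := by
      rw [pvName]
      simp only [hC g0 hg0, pvAlphaB_get, hi]
      by_cases hn : 52 < N g0
      · rw [if_pos (by exact_mod_cast hn), if_pos hn]
      · rw [if_neg (by exact_mod_cast hn), if_neg hn]
    have hstep : (l ++ [k]).foldl (pvMainStep sD C rkD) ([], PySem.Dict.empty)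
        = (st.1 ++ [((rkD.getD g0 0), pvName g0 (N g0) ((pvSeg l g0).length : Int), sD.getD k "")],
           st.2.insert g0 (st.2.getD g0 0 + 1)) := by
      rw [List.foldl_append, List.foldl_cons, List.foldl_nil, ← hst]
      rw [pvMainStep]
      simp only [← hg0def, hname]
    rw [hstep]
    have hrk0 : rkD.getD g0 0 = (G.idxOf g0 : Int) := hR g0 hg0
    have hidx_inj : ∀ g ∈ G, (G.idxOf g0 : Int) = (G.idxOf g : Int) → g0 = g := by
      intro g hgm heq
      have h1 : G.idxOf g0 = G.idxOf g := by exact_mod_cast heq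
      exact (List.idxOf_inj hg0).1 h1
    refine ⟨?_, ?_, ?_⟩
    · intro g
      by_cases hgg : g = g0
      · subst hgg
        rw [PySem.Dict.getD_insert_self, hi, hseg g0, if_pos (by simp)]
        simp only [List.length_append, List.length_cons, List.length_nil]
        push_cast
        omega
      · rw [PySem.Dict.getD_insert, if_neg (fun h => hgg h), ha g, hseg g,
          if_neg (by simp only [beq_iff_eq]; exact fun h => hgg h.symm), List.append_nil]
    · intro g hgm
      rw [List.filter_append, hb g hgm]
      by_cases hgg : g0 = g
      · subst hgg
        rw [hseg g0, if_pos (by simp)]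
        rw [pvEnum_append, List.map_append]
        congr 1
        simp only [List.filter, hrk0, beq_self_eq_true, List.map_cons, List.map_nil, zero_add]
      · have hne : ((rkD.getD g0 0 == (G.idxOf g : Int)) : Bool) = false := by
          rw [hrk0]
          simp only [beq_eq_false_iff_ne, ne_eq]
          exact fun h => hgg (hidx_inj g hgm h)
        rw [hseg g, if_neg (by simp only [beq_iff_eq]; exact hgg), List.append_nil]
        simp [hne]
    · intro e he
      rcases List.mem_append.1 he with he | he
      · exact hc e he
      · refine ⟨g0, hg0, ?_⟩
        simp only [List.mem_singleton] at he
        rw [he, hrk0]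

lemma pvB_eq (seqs : List (String × String)) : phylnames_alt seqs = (pvCanon seqs).items := by
  unfold phylnames_alt pvCanon
  simp only []
  set sD := PySem.Dict.ofList seqs with hsD
  set keys := PySem.List.sorted sD.keys (fun k => k) false with hkeys
  set G := PySem.List.dedup (keys.map pvSub) with hG
  have hndG : G.Nodup := by rw [hG, PySem.List.dedup_eq_ofList]; exact PySem.Set.nodup_ofList _
  have hl : ∀ k ∈ keys, pvSub k ∈ G := by
    intro k hk
    rw [hG, PySem.List.dedup_eq_ofList, PySem.Set.mem_ofList]
    exact List.mem_map_of_mem hk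
  -- split the pre-pass into the counts fold and the rank fold
  rw [PySem.List.foldl_prod_mk
    (f := fun (d : PySem.Dict String Int) k => d.insert (pvSub k) (d.getD (pvSub k) 0 + 1))
    (g := fun (r : PySem.Dict String Int) k => if PySem.Dict.contains r (pvSub k) then r
        else r.insert (pvSub k) (PySem.List.len r.items))]
  set cD := keys.foldl (fun (d : PySem.Dict String Int) k => d.insert (pvSub k) (d.getD (pvSub k) 0 + 1)) PySem.Dict.empty with hcD
  set rD := keys.foldl (fun (r : PySem.Dict String Int) k => if PySem.Dict.contains r (pvSub k) then r
      else r.insert (pvSub k) (PySem.List.len r.items)) PySem.Dict.empty with hrD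
  -- counts
  have hcitems : cD.items = G.map (fun g => (g, ((keys.filter (fun k => pvSub k == g)).length : Int))) := by
    rw [hcD, PySem.List.foldl_congr_mem keys _
      (fun d k => PySem.Dict.insert d (pvSub k) ((fun (acc : Int) (_ : String) => acc + 1) (PySem.Dict.getD d (pvSub k) 0) k))
      PySem.Dict.empty (fun acc x _ => rfl)]
    rw [pvGroupFold (fun (acc : Int) (_ : String) => acc + 1) 0 keys]
    apply List.map_congr_left
    intro g _
    congr 1
    rw [PySem.List.foldl_add _ (fun _ => 1) 0, PySem.List.sum_map_const_int]
    simp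
  have hCg : ∀ g ∈ G, cD.getD g 0 = (((pvSeg keys g).length : Nat) : Int) := by
    intro g hg
    rw [pvGetD_items_map cD G _ hcitems g 0, if_pos hg]
    rfl
  -- ranks
  have hRg : ∀ g ∈ G, rD.getD g 0 = (G.idxOf g : Int) := by
    intro g hg
    exact pvRankGet rD G hndG (by rw [hrD, pvRankFold]) g hg
  -- the flat renaming pass is pvMainStep
  obtain ⟨_, hb, hc⟩ := pvMainFold sD cD rD G (fun g => (pvSeg keys g).length) hCg hRg keys hl
  set st := keys.foldl (pvMainStep sD cD rD) ([], PySem.Dict.empty) with hstdef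
  have hport : (keys.foldl (fun st k =>
      (st.1 ++ [(rD.getD (pvSub k) 0,
          if cD.getD (pvSub k) 0 > 52 then
            PySem.Str.slice (pvSub k) none (some (-1))
              ++ String.ofList [(PySem.Str.pyGet? pvAlphaB (PySem.Int.floordiv (st.2.getD (pvSub k) 0) 52)).getD '?',
                            (PySem.Str.pyGet? pvAlphaB (PySem.Int.mod (st.2.getD (pvSub k) 0) 52)).getD '?']
          else
            pvSub k ++ String.ofList [(PySem.Str.pyGet? pvAlphaB (st.2.getD (pvSub k) 0)).getD '?',],
          sD.getD k "")], st.2.insert (pvSub k) (st.2.getD (pvSub k) 0 + 1)))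
      (([] : List (Int × String × String)), (PySem.Dict.empty : PySem.Dict String Int))) = st := by
    rw [hstdef]
    apply PySem.List.foldl_congr_mem
    intro acc x _
    rw [pvMainStep]
  rw [hport]
  -- the stable sort blocks the entries by group
  have hsorted : PySem.List.sorted st.1 (fun e => e.1) false
      = (G.map (fun g => (G.idxOf g : Int))).flatMap (fun r => st.1.filter (fun e => e.1 == r)) := by
    apply pvStableSort
    · rw [List.pairwise_map]
      rw [List.pairwise_iff_getElem]
      intro i j hi hj hij
      have h1 : G.idxOf G[i] = i := List.Nodup.idxOf_getElem hndG i hi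
      have h2 : G.idxOf G[j] = j := List.Nodup.idxOf_getElem hndG j hj
      rw [h1, h2]
      exact_mod_cast hij
    · intro e he
      obtain ⟨g, hg, heq⟩ := hc e he
      rw [heq]
      exact List.mem_map_of_mem hg
  rw [hsorted, List.flatMap_map, List.foldl_flatMap]
  congr 1
  apply PySem.List.foldl_congr_mem
  intro d g hgm
  rw [hb g hgm, pvEmit, List.foldl_map, List.foldl_map]

-- ===== VERDICT (by name: the statement is the Claim_ definition above) =====
theorem phylnames_spec : Claim_equal_phylnames := by
  intro seqs _ _
  unfold Spec_phylnames
  rw [pvA_eq, pvB_eq]
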